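-- pv_equiv track=rewrite | github.com/eberharf/fges-py | tests/test_meek_rules.py | group_edges
-- ===== SOURCE A (Python) =====
-- def group_edges(edges):
--     undirs = []
--     dirs = []
--     for e in edges:
--         if e[::-1] in dirs:
--             dirs.remove(e[::-1])
--             undirs.append(e)
--         else:
--             dirs.append(e)
--     return undirs, dirs
-- ===== SOURCE B (Python) =====
-- def group_edges(edges):
--     gone = [False] * len(edges)
--     queues = {}   # edge value -> indices of live directed edges with that value, in order
--     heads = {}    # edge value -> number of entries consumed from the front of its queue
--     undirs = []
--     for i, e in enumerate(edges):
--         r = e[::-1]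
--         q = queues.get(r)
--         h = heads.get(r, 0)
--         if q is not None and h < len(q):
--             gone[q[h]] = True
--             gone[i] = True
--             heads[r] = h + 1
--             undirs.append(e)
--         else:
--             queues.setdefault(e, []).append(i)
--     dirs = [e for e, g in zip(edges, gone) if not g]
--     return undirs, dirs
-- ===== Notes on version B (the rewrite author's own statement) =====
-- stated objective: alternative
-- what changed: Replaces the per-edge 'in dirs' membership test and dirs.remove scan by a hash map from edge value to a FIFO queue of live edge indices with a head pointer; consumed edges are marked in a flag list and dirs is produced by one final filter.
import Mathlib
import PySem

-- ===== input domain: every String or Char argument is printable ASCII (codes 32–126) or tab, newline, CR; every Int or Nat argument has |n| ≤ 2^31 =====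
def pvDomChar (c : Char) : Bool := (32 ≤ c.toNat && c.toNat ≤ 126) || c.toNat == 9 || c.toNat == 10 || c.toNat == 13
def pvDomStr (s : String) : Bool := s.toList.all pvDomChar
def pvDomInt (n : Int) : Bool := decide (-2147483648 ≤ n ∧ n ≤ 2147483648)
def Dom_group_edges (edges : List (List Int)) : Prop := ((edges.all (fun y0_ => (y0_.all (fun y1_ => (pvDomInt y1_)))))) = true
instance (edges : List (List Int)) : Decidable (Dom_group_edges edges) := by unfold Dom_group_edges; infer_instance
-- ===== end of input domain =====

-- B replaces A's 'in dirs' / 'dirs.remove' list scans by a map from edge value to a FIFO queue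
-- of live edge indices (head pointer), marking consumed edges in a flag list (objective: alternative).

-- ===== PORT A =====
-- loop body of A: 'if e[::-1] in dirs: dirs.remove(e[::-1]); undirs.append(e); else: dirs.append(e)'
def stepA (st : List (List Int) × List (List Int)) (e : List Int) :
    List (List Int) × List (List Int) :=
  let r := (PySem.List.slice? e none none (-1)).getD []   -- e[::-1] (step -1 never raises)
  if r ∈ st.2 then
    (st.1 ++ [e], (PySem.List.remove? st.2 r).getD st.2)  -- membership was checked, remove? = some _
  else
    (st.1, st.2 ++ [e])

def group_edges (edges : List (List Int)) : List (List Int) × List (List Int) :=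
  edges.foldl stepA ([], [])

-- ===== PORT B =====
-- loop body of B; state = (undirs, gone, queues, heads)
def stepB
    (st : List (List Int) × List Bool × PySem.Dict (List Int) (List Int) × PySem.Dict (List Int) Int)
    (ie : Int × List Int) :
    List (List Int) × List Bool × PySem.Dict (List Int) (List Int) × PySem.Dict (List Int) Int :=
  let undirs := st.1
  let gone := st.2.1
  let queues := st.2.2.1
  let heads := st.2.2.2
  let i := ie.1
  let e := ie.2
  let r := (PySem.List.slice? e none none (-1)).getD []   -- r = e[::-1]
  let q := queues.getD r []                               -- queues.get(r): a missing key acts as an empty queue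
  let h := heads.getD r 0                                 -- heads.get(r, 0)
  if h < (q.length : Int) then
    let j := (PySem.List.pyGet? q h).getD 0               -- q[h]; 0 ≤ h < len(q) in this branch
    (undirs ++ [e], (gone.set j.toNat true).set i.toNat true, queues, heads.insert r (h + 1))
  else
    (undirs, gone, queues.modify e [] (· ++ [i]), heads)  -- queues.setdefault(e, []).append(i)

def group_edges_alt (edges : List (List Int)) : List (List Int) × List (List Int) :=
  let st := (PySem.List.enumerate edges).foldl stepB
    ([], List.replicate edges.length false, PySem.Dict.empty, PySem.Dict.empty)
  -- dirs = [e for e, g in zip(edges, gone) if not g]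
  (st.1, ((edges.zip st.2.1).filter (fun p => !p.2)).map Prod.fst)

-- ===== PRECONDITION & SPEC =====
def Spec_group_edges (edges : List (List Int)) (out : List (List Int) × List (List Int)) : Prop := out = group_edges_alt edges
instance (edges : List (List Int)) (out : List (List Int) × List (List Int)) : Decidable (Spec_group_edges edges out) := by unfold Spec_group_edges; infer_instance

-- ===== CLAIM (what is proved, stated in full; the proofs are below) =====
def Claim_equal_group_edges : Prop := ∀ (edges : List (List Int)), Dom_group_edges edges → Spec_group_edges edges (group_edges edges)

-- ===== LEMMAS AND PROOFS =====

-- the live directed pairs after processing the prefix `done`, given the flag list g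
def liveL (done : List (List Int)) (g : List Bool) : List (Int × List Int) :=
  (PySem.List.enumerate done).filter (fun p => !(g.getD p.1.toNat true))

-- the coupling invariant between A's state and B's state after processing `done`
def CoupInv (done : List (List Int))
    (sa : List (List Int) × List (List Int))
    (sb : List (List Int) × List Bool × PySem.Dict (List Int) (List Int) × PySem.Dict (List Int) Int) : Prop :=
  sb.1 = sa.1 ∧
  sa.2 = (liveL done sb.2.1).map Prod.snd ∧
  (∀ j, done.length ≤ j → j < sb.2.1.length → sb.2.1.getD j true = false) ∧
  (∀ v, 0 ≤ sb.2.2.2.getD v 0 ∧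
        (sb.2.2.2.getD v 0).toNat ≤ (sb.2.2.1.getD v []).length ∧
        (sb.2.2.1.getD v []).drop (sb.2.2.2.getD v 0).toNat
          = ((liveL done sb.2.1).filter (fun p => p.2 == v)).map Prod.fst)

theorem stepB_gone_length
    (sb : List (List Int) × List Bool × PySem.Dict (List Int) (List Int) × PySem.Dict (List Int) Int)
    (ie : Int × List Int) : (stepB sb ie).2.1.length = sb.2.1.length := by
  unfold stepB
  dsimp only
  split <;> simp

theorem mem_liveL {done : List (List Int)} {g : List Bool} {p : Int × List Int}
    (h : p ∈ liveL done g) : ∃ k : Nat, k < done.length ∧ p.1 = (k : Int) := by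
  have hm := List.mem_of_mem_filter h
  rw [PySem.List.mem_enumerate_iff] at hm
  obtain ⟨k, hk, rfl⟩ := hm
  exact ⟨k, hk, by simp⟩

theorem pairwise_liveL (done : List (List Int)) (g : List Bool) :
    (liveL done g).Pairwise (fun p q => p.1 < q.1) := by
  exact List.Pairwise.filter _ (PySem.List.pairwise_lt_enumerate done 0)

theorem liveL_set (done : List (List Int)) (g : List Bool) (a : Nat) (ha : a < g.length) :
    liveL done (g.set a true) = (liveL done g).filter (fun p => p.1.toNat != a) := by
  unfold liveL
  rw [List.filter_filter]
  apply List.filter_congr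
  intro p _
  by_cases hpa : p.1.toNat = a
  · rw [hpa]
    simp [List.getD_eq_getElem?_getD, List.getElem?_set_self ha]
  · simp [List.getD_eq_getElem?_getD, List.getElem?_set_ne (fun h => hpa h.symm), hpa]

theorem liveL_append_one (done : List (List Int)) (g : List Bool) (e : List Int) :
    liveL (done ++ [e]) g
      = liveL done g ++ (if g.getD done.length true then [] else [((done.length : Int), e)]) := by
  unfold liveL
  rw [PySem.List.enumerate_append, List.filter_append]
  congr 1
  simp [PySem.List.enumerate_cons, PySem.List.enumerate_nil]
  split <;> simp_all

theorem remove?_map_snd (l1 l2 : List (Int × List Int)) (j0 : Int) (r : List Int)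
    (h : ∀ p ∈ l1, p.2 ≠ r) :
    PySem.List.remove? ((l1 ++ (j0, r) :: l2).map Prod.snd) r
      = some ((l1 ++ l2).map Prod.snd) := by
  induction l1 with
  | nil => simp
  | cons a l1 ih =>
    simp only [List.map_cons, List.cons_append]
    rw [PySem.List.remove?_cons_of_ne _ (h a (by simp)), ih (fun p hp => h p (by simp [hp]))]
    rfl

theorem step_preserve (done : List (List Int)) (e : List Int)
    (sa : List (List Int) × List (List Int))
    (sb : List (List Int) × List Bool × PySem.Dict (List Int) (List Int) × PySem.Dict (List Int) Int)
    (hlen : done.length < sb.2.1.length)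
    (h : CoupInv done sa sb) :
    CoupInv (done ++ [e]) (stepA sa e) (stepB sb ((done.length : Int), e)) := by
  obtain ⟨u', g, Q, H⟩ := sb
  obtain ⟨u, d⟩ := sa
  obtain ⟨hu, hd, hsuf, hqh⟩ := h
  dsimp only at hu hd hsuf hqh hlen
  set r : List Int := e.reverse with hr
  obtain ⟨hH0, hHle, hdrop⟩ := hqh r
  -- the two branch conditions agree: both say the live queue for r is nonempty
  have hflen : (Q.getD r []).length - (H.getD r 0).toNat
      = (((liveL done g).filter (fun p => p.2 == r)).map Prod.fst).length := by
    rw [← hdrop]; simp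
  by_cases hne : ((liveL done g).filter (fun p => p.2 == r)) = []
  · -- else branch on both sides
    have hcondB : ¬ (H.getD r 0 < ((Q.getD r []).length : Int)) := by
      rw [hne] at hflen; simp at hflen; omega
    have hcondA : r ∉ d := by
      rw [hd]
      intro hmem
      obtain ⟨p, hp, hp2⟩ := List.mem_map.mp hmem
      have : p ∈ (liveL done g).filter (fun p => p.2 == r) :=
        List.mem_filter.mpr ⟨hp, by simp [hp2]⟩
      simp [hne] at this
    rw [stepA, stepB]
    simp only [PySem.List.slice?_none_none_neg_one, Option.getD_some, ← hr]
    rw [if_neg hcondA, if_neg hcondB]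
    have hglive : g.getD done.length true = false := hsuf done.length le_rfl hlen
    have hlive' : liveL (done ++ [e]) g = liveL done g ++ [((done.length : Int), e)] := by
      rw [liveL_append_one, hglive]; simp
    refine ⟨hu, ?_, ?_, ?_⟩
    · dsimp only; rw [hlive']; simp [hd]
    · intro j hj hjl
      exact hsuf j (by simp at hj; omega) hjl
    · intro v
      obtain ⟨h0v, hlev, hdv⟩ := hqh v
      by_cases hve : v = e
      · subst hve
        dsimp only
        rw [PySem.Dict.getD_modify_self]
        refine ⟨h0v, by simp; omega, ?_⟩
        rw [List.drop_append_of_le_length hlev, hdv, hlive']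
        simp
      · dsimp only
        rw [PySem.Dict.getD_modify_of_ne _ _ _ (fun hh => hve hh)]
        refine ⟨h0v, hlev, ?_⟩
        rw [hdv, hlive']
        simp [Ne.symm hve]
  · -- removal branch on both sides
    have hcondB : H.getD r 0 < ((Q.getD r []).length : Int) := by
      have : ((liveL done g).filter (fun p => p.2 == r)).length ≠ 0 := by
        simpa [List.length_eq_zero_iff] using hne
      simp at hflen
      omega
    obtain ⟨p0, tl, hfe⟩ : ∃ p0 tl, (liveL done g).filter (fun p => p.2 == r) = p0 :: tl := by
      cases hx : (liveL done g).filter (fun p => p.2 == r) with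
      | nil => exact absurd hx hne
      | cons a b => exact ⟨a, b, rfl⟩
    obtain ⟨l1, l2, hsplit, hl1, hp0r, hl2⟩ := List.filter_eq_cons_iff.mp hfe
    have hp0r' : p0.2 = r := by simpa using hp0r
    have hl1' : ∀ p ∈ l1, p.2 ≠ r := fun p hp => by simpa using hl1 p hp
    have hcondA : r ∈ d := by
      rw [hd, hsplit]
      exact List.mem_map.mpr ⟨p0, by simp, hp0r'⟩
    -- the head of the live queue is p0's index
    have hj : PySem.List.pyGet? (Q.getD r []) (H.getD r 0) = some p0.1 := by
      rw [PySem.List.pyGet?_of_nonneg _ hH0, ← List.head?_drop, hdrop, hfe]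
      simp
    obtain ⟨k0, hk0, hp01⟩ : ∃ k : Nat, k < done.length ∧ p0.1 = (k : Int) :=
      mem_liveL (p := p0) (by rw [hsplit]; simp)
    rw [stepA, stepB]
    simp only [PySem.List.slice?_none_none_neg_one, Option.getD_some, ← hr]
    rw [if_pos hcondA, if_pos hcondB, hj]
    simp only [Option.getD_some, Int.toNat_natCast]
    -- the new flag list and its live pairs
    set g' : List Bool := (g.set p0.1.toNat true).set done.length true with hg'
    have hfsts : ∀ p ∈ l1 ++ l2, p.1.toNat ≠ p0.1.toNat := by
      intro p hp
      have hpw : (liveL done g).Pairwise (fun p q => p.1 < q.1) := pairwise_liveL done g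
      rw [hsplit] at hpw
      have hpm : p ∈ liveL done g := by
        rw [hsplit]; rcases List.mem_append.mp hp with h1 | h1 <;> simp [h1]
      obtain ⟨k, hk, hpk⟩ := mem_liveL hpm
      have : p.1 ≠ p0.1 := by
        rcases List.mem_append.mp hp with h1 | h1
        · have := (List.pairwise_append.mp hpw).2.2 p h1 p0 (by simp)
          omega
        · have hpw2 := (List.pairwise_append.mp hpw).2.1
          have := (List.pairwise_cons.mp hpw2).1 p h1
          omega
      omega
    have hlive' : liveL (done ++ [e]) g' = l1 ++ l2 := by
      have h1 : g'.getD done.length true = true := by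
        rw [hg', List.getD_eq_getElem?_getD, List.getElem?_set_self (by simpa using hlen)]
        rfl
      rw [liveL_append_one, h1, if_pos rfl, List.append_nil]
      rw [liveL_set _ _ _ (by simpa using hlen), liveL_set _ _ _ (by rw [hp01]; simpa using hk0.trans hlen)]
      rw [List.filter_filter]
      have : ∀ p ∈ liveL done g,
          ((p.1.toNat != done.length) && (p.1.toNat != p0.1.toNat))
            = (p.1.toNat != p0.1.toNat) := by
        intro p hp
        obtain ⟨k, hk, hpk⟩ := mem_liveL hp
        have : p.1.toNat ≠ done.length := by omega
        simp [this]
      rw [List.filter_congr this, hsplit, List.filter_append]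
      have hkeep1 : l1.filter (fun p => p.1.toNat != p0.1.toNat) = l1 :=
        List.filter_eq_self.mpr (fun p hp => by simp [hfsts p (List.mem_append_left _ hp)])
      have hkeep2 : l2.filter (fun p => p.1.toNat != p0.1.toNat) = l2 :=
        List.filter_eq_self.mpr (fun p hp => by simp [hfsts p (List.mem_append_right _ hp)])
      rw [hkeep1]
      simp [hkeep2]
    refine ⟨by simp [hu], ?_, ?_, ?_⟩
    · dsimp only
      rw [hlive', hd, hsplit, ← hp0r']
      rw [remove?_map_snd l1 l2 p0.1 p0.2 (by rw [hp0r']; exact hl1')]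
      simp
    · intro j hj hjl
      have hjl' : j < g.length := by rw [hg'] at hjl; simpa using hjl
      have hjge : done.length + 1 ≤ j := by simpa using hj
      have hk0' : p0.1.toNat = k0 := by rw [hp01]; simp
      rw [hg', List.getD_eq_getElem?_getD,
          List.getElem?_set_ne (by omega), List.getElem?_set_ne (by omega),
          ← List.getD_eq_getElem?_getD]
      exact hsuf j (by omega) hjl'
    · intro v
      obtain ⟨h0v, hlev, hdv⟩ := hqh v
      by_cases hvr : v = r
      · subst hvr
        dsimp only
        rw [PySem.Dict.getD_insert_self]
        have hfl0 : ((liveL done g).filter (fun p => p.2 == r)).length ≠ 0 := by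
          simpa [List.length_eq_zero_iff] using hne
        have hlt : (H.getD r 0).toNat < (Q.getD r []).length := by
          simp at hflen; omega
        refine ⟨by omega, by omega, ?_⟩
        have h1n : (H.getD r 0 + 1).toNat = (H.getD r 0).toNat + 1 := by omega
        have hdd : (Q.getD r []).drop ((H.getD r 0).toNat + 1)
            = ((Q.getD r []).drop (H.getD r 0).toNat).drop 1 := by
          rw [List.drop_drop]
        rw [h1n, hdd, hdrop, hfe, hlive']
        have hl1f : l1.filter (fun p => p.2 == r) = [] :=
          List.filter_eq_nil_iff.mpr (fun p hp => by simp [hl1' p hp])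
        simp [List.filter_append, hl1f, hl2]
      · dsimp only
        rw [PySem.Dict.getD_insert_of_ne _ _ _ hvr]
        refine ⟨h0v, hlev, ?_⟩
        rw [hdv, hlive', hsplit]
        simp [List.filter_append, hp0r', Ne.symm hvr]

theorem fold_inv (rest done : List (List Int))
    (sa : List (List Int) × List (List Int))
    (sb : List (List Int) × List Bool × PySem.Dict (List Int) (List Int) × PySem.Dict (List Int) Int)
    (hlen : sb.2.1.length = done.length + rest.length)
    (h : CoupInv done sa sb) :
    CoupInv (done ++ rest) (rest.foldl stepA sa)
      ((PySem.List.enumerate rest (done.length : Int)).foldl stepB sb) := by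
  induction rest generalizing done sa sb with
  | nil => simpa using h
  | cons e rest ih =>
    rw [PySem.List.enumerate_cons]
    simp only [List.foldl_cons]
    have hst := step_preserve done e sa sb (by simp at hlen; omega) h
    have hl2 : (stepB sb ((done.length : Int), e)).2.1.length = (done ++ [e]).length + rest.length := by
      rw [stepB_gone_length]; simp at hlen ⊢; omega
    have := ih (done ++ [e]) (stepA sa e) (stepB sb ((done.length : Int), e)) hl2 hst
    simp only [List.length_append, List.length_cons, List.length_nil] at this
    push_cast at this ⊢
    simpa [List.append_assoc] using this

theorem final_aux (xs : List (List Int)) : ∀ (g : List Bool) (s : Nat), s + xs.length ≤ g.length →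
    ((PySem.List.enumerate xs (s : Int)).filter (fun p => !(g.getD p.1.toNat true))).map Prod.snd
      = ((xs.zip (g.drop s)).filter (fun p => !p.2)).map Prod.fst := by
  induction xs with
  | nil => simp
  | cons x xs ih =>
    intro g s hs
    have hs' : s < g.length := by simp at hs; omega
    rw [PySem.List.enumerate_cons]
    rw [show g.drop s = g[s] :: g.drop (s + 1) from (List.getElem_cons_drop hs').symm]
    have hcast : (s : Int) + 1 = ((s + 1 : Nat) : Int) := by push_cast; ring
    have htl := ih g (s + 1) (by simp at hs ⊢; omega)
    have hgd : g.getD s true = g[s] := by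
      rw [List.getD_eq_getElem?_getD, List.getElem?_eq_getElem hs']; rfl
    rw [List.zip_cons_cons, hcast]
    simp only [List.filter_cons, Int.toNat_natCast, hgd]
    simp only [List.getD_eq_getElem?_getD] at htl
    cases hb : g[s] <;> (simp; rw [hcast]; exact htl)

theorem liveL_nil (g : List Bool) : liveL [] g = [] := by
  simp [liveL, PySem.List.enumerate_nil]

theorem foldB_gone_length (l : List (Int × List Int))
    (sb : List (List Int) × List Bool × PySem.Dict (List Int) (List Int) × PySem.Dict (List Int) Int) :
    ((l.foldl stepB sb).2.1.length = sb.2.1.length) := by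
  induction l generalizing sb with
  | nil => rfl
  | cons a l ih => rw [List.foldl_cons, ih, stepB_gone_length]

-- ===== VERDICT (by name: the statement is the Claim_ definition above) =====
theorem group_edges_spec : Claim_equal_group_edges := by
  unfold Claim_equal_group_edges
  intro edges _
  unfold Spec_group_edges group_edges group_edges_alt
  have hinit : CoupInv [] ([], [])
      ([], List.replicate edges.length false, PySem.Dict.empty, PySem.Dict.empty) := by
    refine ⟨rfl, by simp [liveL_nil], ?_, ?_⟩
    · intro j _ hjl
      simp at hjl
      simp [List.getD_eq_getElem?_getD, List.getElem?_replicate_of_lt hjl]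
    · intro v
      simp [PySem.Dict.getD_empty, liveL_nil]
  have h := fold_inv edges [] ([], [])
    ([], List.replicate edges.length false, PySem.Dict.empty, PySem.Dict.empty)
    (by simp) hinit
  simp only [List.nil_append, List.length_nil, Nat.cast_zero] at h
  obtain ⟨hu, hd, _, _⟩ := h
  set sb := (PySem.List.enumerate edges).foldl stepB
    ([], List.replicate edges.length false, PySem.Dict.empty, PySem.Dict.empty) with hsb
  have hglen : sb.2.1.length = edges.length := by
    rw [hsb, foldB_gone_length]; simp
  apply Prod.ext
  · exact hu.symm
  · dsimp only
    rw [hd]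
    have := final_aux edges sb.2.1 0 (by omega)
    simpa [liveL] using this
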